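-- pv_equiv track=rewrite | github.com/JochenWeerda/scribus-gamma-dashboard-plugin | tools/extract_pdfs_and_create_layout.py | parse_chapter_structure
-- ===== SOURCE A (Python) =====
-- def parse_chapter_structure(text):
--     """Erkennt Überschriften und Absätze"""
--     lines = text.split('\n')
--     structure = []
--     current_para = []
--
--     for line in lines:
--         line = line.strip()
--         if not line:
--             if current_para:
--                 structure.append(('para', ' '.join(current_para)))
--                 current_para = []
--             continue
--
--         # Große Überschrift (GROSSBUCHSTABEN oder sehr lang)
--         if line.isupper() and len(line) > 10:
--             if current_para:
--                 structure.append(('para', ' '.join(current_para)))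
--                 current_para = []
--             structure.append(('heading', line))
--         # Kleine Überschrift (fett oder kurz)
--         elif len(line) < 80 and (line.endswith(':') or line.isupper()):
--             if current_para:
--                 structure.append(('para', ' '.join(current_para)))
--                 current_para = []
--             structure.append(('subheading', line))
--         else:
--             current_para.append(line)
--
--     if current_para:
--         structure.append(('para', ' '.join(current_para)))
--
--     return structure
-- ===== SOURCE B (Python) =====
-- def parse_chapter_structure(text):
--     """Erkennt Ueberschriften und Absaetze (run-based index scan: no flush buffer;
--     each paragraph is taken as one maximal run of text lines via an inner scan)"""
--     def kind(line):
--         if line.isupper() and len(line) > 10: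
--             return 'heading'
--         if len(line) < 80 and (line.endswith(':') or line.isupper()):
--             return 'subheading'
--         return 'text'
--
--     lines = [l.strip() for l in text.split('\n')]
--     structure = []
--     i, n = 0, len(lines)
--     while i < n:
--         line = lines[i]
--         if not line:
--             i += 1
--         else:
--             k = kind(line)
--             if k != 'text':
--                 structure.append((k, line))
--                 i += 1
--             else:
--                 j = i + 1
--                 while j < n and lines[j] and kind(lines[j]) == 'text':
--                     j += 1
--                 structure.append(('para', ' '.join(lines[i:j])))
--                 i = j
--     return structure
-- ===== Notes on version B (the rewrite author's own statement) =====
-- stated objective: alternative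
-- what changed: A folds over lines with a mutable paragraph buffer flushed at three different sites; B keeps no buffer at all: an index scan that, upon meeting a text line, runs an inner scan to the end of the maximal run of text lines and emits that whole run as one paragraph via a slice join.
import Mathlib
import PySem

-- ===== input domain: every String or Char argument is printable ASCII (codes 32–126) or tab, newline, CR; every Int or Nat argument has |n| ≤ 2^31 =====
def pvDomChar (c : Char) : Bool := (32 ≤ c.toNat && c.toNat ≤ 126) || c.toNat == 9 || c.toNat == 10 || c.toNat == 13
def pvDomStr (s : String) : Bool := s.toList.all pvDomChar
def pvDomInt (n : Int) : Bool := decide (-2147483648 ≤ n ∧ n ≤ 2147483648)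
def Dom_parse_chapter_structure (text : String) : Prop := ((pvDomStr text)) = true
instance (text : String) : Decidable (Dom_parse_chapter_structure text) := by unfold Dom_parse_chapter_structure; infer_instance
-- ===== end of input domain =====

-- B replaces A's flush-buffer fold by a run-based scan that takes each paragraph as one
-- maximal run of text lines (objective: alternative decomposition, same cost).

-- ===== PORT A =====
-- hand port of Python str.isupper (exact on ASCII: at least one uppercase letter and no lowercase letter)
def pyStrIsupper (s : String) : Bool :=
  s.toList.any PySem.Chars.isupper && s.toList.all (fun c => !PySem.Chars.islower c)

-- the body of A's for-loop AFTER 'line = line.strip()', on state (structure, current_para)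
def pvStepA' (st : List (String × String) × List String) (line : String) :
    List (String × String) × List String :=
  if PySem.Str.len line = 0 then
    if st.2 ≠ [] then (st.1 ++ [("para", PySem.Str.join " " st.2)], []) else st
  else if pyStrIsupper line && decide (10 < PySem.Str.len line) then
    ((if st.2 ≠ [] then st.1 ++ [("para", PySem.Str.join " " st.2)] else st.1)
      ++ [("heading", line)], [])
  else if decide (PySem.Str.len line < 80)
        && (PySem.Str.endswith line ":" || pyStrIsupper line) then
    ((if st.2 ≠ [] then st.1 ++ [("para", PySem.Str.join " " st.2)] else st.1)
      ++ [("subheading", line)], [])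
  else
    (st.1, st.2 ++ [line])

-- the body of A's for-loop: 'line = line.strip()' then the branches
def pvStepA (st : List (String × String) × List String) (raw : String) :
    List (String × String) × List String :=
  pvStepA' st (PySem.Str.strip raw)

-- A's trailing 'if current_para: structure.append(...)'
def pvFinish (r : List (String × String) × List String) : List (String × String) :=
  if r.2 ≠ [] then r.1 ++ [("para", PySem.Str.join " " r.2)] else r.1

def parse_chapter_structure (text : String) : List (String × String) :=
  let lines := (PySem.Str.split? text "\n").getD []
  pvFinish (lines.foldl pvStepA ([], []))

-- ===== PORT B =====
-- B's kind(line) helper (checked on already-stripped, non-empty lines)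
def pvKindB (line : String) : String :=
  if pyStrIsupper line && decide (10 < PySem.Str.len line) then "heading"
  else if decide (PySem.Str.len line < 80)
        && (PySem.Str.endswith line ":" || pyStrIsupper line) then "subheading"
  else "text"

-- B's inner-scan condition 'lines[j] and kind(lines[j]) == "text"'
def pvIsText (l : String) : Bool := !(PySem.Str.len l == 0) && (pvKindB l == "text")

-- B's outer while loop over the suffix lines[i:], with the inner scan as takeWhile
def pvGoB : List String → List (String × String)
  | [] => []
  | l :: rest =>
    if PySem.Str.len l = 0 then pvGoB rest
    else if pvKindB l != "text" then (pvKindB l, l) :: pvGoB rest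
    else
      let run := rest.takeWhile pvIsText
      ("para", PySem.Str.join " " (l :: run)) :: pvGoB (rest.drop run.length)
termination_by ls => ls.length

def parse_chapter_structure_alt (text : String) : List (String × String) :=
  pvGoB (((PySem.Str.split? text "\n").getD []).map PySem.Str.strip)

-- ===== PRECONDITION & SPEC =====
def Spec_parse_chapter_structure (text : String) (out : List (String × String)) : Prop := out = parse_chapter_structure_alt text
instance (text : String) (out : List (String × String)) : Decidable (Spec_parse_chapter_structure text out) := by unfold Spec_parse_chapter_structure; infer_instance

-- ===== CLAIM (what is proved, stated in full; the proofs are below) =====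
def Claim_equal_parse_chapter_structure : Prop := ∀ (text : String), Dom_parse_chapter_structure text → Spec_parse_chapter_structure text (parse_chapter_structure text)

-- ===== LEMMAS AND PROOFS =====
-- A's finished fold from state ([], cur), the quantity the invariant tracks
def pvRunA (cur : List String) (ls : List String) : List (String × String) :=
  pvFinish (ls.foldl pvStepA' ([], cur))

-- the accumulator only ever grows by appends: it factors out of the step …
theorem stepA'_acc (acc : List (String × String)) (cur : List String) (l : String) :
    pvStepA' (acc, cur) l
      = (acc ++ (pvStepA' ([], cur) l).1, (pvStepA' ([], cur) l).2) := by
  unfold pvStepA'; split_ifs <;> simp_all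

-- … hence out of the whole fold …
theorem foldl_stepA'_acc (ls : List String) (acc : List (String × String)) (cur : List String) :
    ls.foldl pvStepA' (acc, cur)
      = (acc ++ (ls.foldl pvStepA' ([], cur)).1, (ls.foldl pvStepA' ([], cur)).2) := by
  induction ls generalizing acc cur with
  | nil => simp
  | cons l t ih =>
    simp only [List.foldl_cons]
    rw [stepA'_acc acc cur l]
    generalize pvStepA' ([], cur) l = p
    obtain ⟨b1, b2⟩ := p
    dsimp only
    rw [ih (acc ++ b1) b2, ih b1 b2]
    simp

-- … and out of the finished fold
theorem runA_acc (ls : List String) (acc : List (String × String)) (cur : List String) :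
    pvFinish (ls.foldl pvStepA' (acc, cur)) = acc ++ pvRunA cur ls := by
  rw [foldl_stepA'_acc]
  unfold pvRunA pvFinish
  split_ifs <;> simp_all

-- on a text line A's step only appends to the paragraph buffer
theorem stepA'_text (st : List (String × String) × List String) (l : String)
    (h0 : ¬ PySem.Str.len l = 0) (hk : pvKindB l = "text") :
    pvStepA' st l = (st.1, st.2 ++ [l]) := by
  by_cases c1 : (pyStrIsupper l && decide (10 < PySem.Str.len l)) = true
  · exfalso; unfold pvKindB at hk; rw [if_pos c1] at hk; exact absurd hk (by decide)
  · by_cases c2 : (decide (PySem.Str.len l < 80)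
        && (PySem.Str.endswith l ":" || pyStrIsupper l)) = true
    · exfalso; unfold pvKindB at hk; rw [if_neg c1, if_pos c2] at hk
      exact absurd hk (by decide)
    · unfold pvStepA'; rw [if_neg h0, if_neg c1, if_neg c2]

-- pvIsText unpacked
theorem isText_iff (l : String) :
    pvIsText l = true ↔ (¬ PySem.Str.len l = 0 ∧ pvKindB l = "text") := by
  unfold pvIsText
  constructor
  · intro h; simp only [Bool.and_eq_true, Bool.not_eq_eq_eq_not, Bool.not_true,
      beq_eq_false_iff_ne, beq_iff_eq, ne_eq] at h; exact h
  · intro ⟨h0, hk⟩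
    have h0' : ¬ l = "" := fun e => h0 (by rw [e]; rfl)
    simp [hk, h0']

-- a whole run of text lines just extends the buffer
theorem foldl_stepA'_run (run : List String) (tail : List String) (cur : List String)
    (h : ∀ x ∈ run, pvIsText x = true) :
    (run ++ tail).foldl pvStepA' ([], cur) = tail.foldl pvStepA' ([], cur ++ run) := by
  induction run generalizing cur with
  | nil => simp
  | cons a t ih =>
    obtain ⟨h0, hk⟩ := (isText_iff a).1 (h a (by simp))
    simp only [List.cons_append, List.foldl_cons]
    rw [stepA'_text _ _ h0 hk]
    simpa using ih (cur ++ [a]) (fun x hx => h x (by simp [hx]))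

-- a non-empty buffer is flushed as one 'para' entry at the next non-text line (or at the end)
theorem runA_flush (ls : List String) (cur : List String) (hcur : cur ≠ [])
    (hhd : ∀ l, ls.head? = some l → pvIsText l = false) :
    pvRunA cur ls = ("para", PySem.Str.join " " cur) :: pvRunA [] ls := by
  cases ls with
  | nil => simp [pvRunA, pvFinish, hcur]
  | cons l rest =>
    have hl : pvIsText l = false := hhd l rfl
    unfold pvRunA
    simp only [List.foldl_cons]
    by_cases h0 : PySem.Str.len l = 0
    · -- blank line: flush / skip
      rw [show pvStepA' ([], cur) l = ([("para", PySem.Str.join " " cur)], []) by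
            unfold pvStepA'; rw [if_pos h0]; simp [hcur],
          show pvStepA' (([] : List (String × String)), ([] : List String)) l = ([], []) by
            unfold pvStepA'; rw [if_pos h0]; simp]
      rw [runA_acc]; rfl
    · have hkne : ¬ pvKindB l = "text" := by
        intro hk
        rw [(isText_iff l).2 ⟨h0, hk⟩] at hl; exact Bool.true_eq_false.mp hl
      by_cases c1 : (pyStrIsupper l && decide (10 < PySem.Str.len l)) = true
      · rw [show pvStepA' ([], cur) l
              = ([("para", PySem.Str.join " " cur), ("heading", l)], []) by
              unfold pvStepA'; rw [if_neg h0, if_pos c1]; simp [hcur],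
            show pvStepA' (([] : List (String × String)), ([] : List String)) l
              = ([("heading", l)], []) by
              unfold pvStepA'; rw [if_neg h0, if_pos c1]; simp]
        rw [runA_acc, runA_acc]; rfl
      · by_cases c2 : (decide (PySem.Str.len l < 80)
            && (PySem.Str.endswith l ":" || pyStrIsupper l)) = true
        · rw [show pvStepA' ([], cur) l
                = ([("para", PySem.Str.join " " cur), ("subheading", l)], []) by
                unfold pvStepA'; rw [if_neg h0, if_neg c1, if_pos c2]; simp [hcur],
              show pvStepA' (([] : List (String × String)), ([] : List String)) l
                = ([("subheading", l)], []) by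
                unfold pvStepA'; rw [if_neg h0, if_neg c1, if_pos c2]; simp]
          rw [runA_acc, runA_acc]; rfl
        · exact absurd (by unfold pvKindB; rw [if_neg c1, if_neg c2]) hkne

-- the first element surviving dropWhile fails the predicate
theorem head?_dropWhile_false (p : String → Bool) (l : List String) (x : String)
    (h : (l.dropWhile p).head? = some x) : p x = false := by
  induction l with
  | nil => simp at h
  | cons a t ih =>
    by_cases hp : p a
    · simpa [List.dropWhile, hp] using ih (by simpa [List.dropWhile, hp] using h)
    · simp [List.dropWhile, hp] at h; subst h; simpa using hp

-- drop past the takeWhile prefix is dropWhile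
theorem drop_length_takeWhile (p : String → Bool) (l : List String) :
    l.drop (l.takeWhile p).length = l.dropWhile p := by
  induction l with
  | nil => rfl
  | cons a t ih => by_cases h : p a <;> simp [List.takeWhile, List.dropWhile, h, ih]

-- MAIN INVARIANT: A's finished fold from the empty state equals B's run-based scan
theorem runA_eq_goB (ls : List String) : pvRunA [] ls = pvGoB ls := by
  induction ls using pvGoB.induct with
  | case1 => simp [pvRunA, pvFinish, pvGoB]
  | case2 l rest h0 ih =>
    unfold pvRunA
    simp only [List.foldl_cons]
    rw [show pvStepA' (([] : List (String × String)), ([] : List String)) l = ([], []) by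
          unfold pvStepA'; rw [if_pos h0]; simp]
    unfold pvGoB
    rw [if_pos h0]
    exact ih
  | case3 l rest h0 hk ih =>
    -- heading or subheading line
    have hkne : ¬ pvKindB l = "text" := by simpa [bne_iff_ne] using hk
    have hstep : pvStepA' (([] : List (String × String)), ([] : List String)) l
        = ([(pvKindB l, l)], []) := by
      by_cases c1 : (pyStrIsupper l && decide (10 < PySem.Str.len l)) = true
      · have : pvKindB l = "heading" := by unfold pvKindB; rw [if_pos c1]
        rw [this]; unfold pvStepA'; rw [if_neg h0, if_pos c1]; simp
      · by_cases c2 : (decide (PySem.Str.len l < 80)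
            && (PySem.Str.endswith l ":" || pyStrIsupper l)) = true
        · have : pvKindB l = "subheading" := by unfold pvKindB; rw [if_neg c1, if_pos c2]
          rw [this]; unfold pvStepA'; rw [if_neg h0, if_neg c1, if_pos c2]; simp
        · exact absurd (by unfold pvKindB; rw [if_neg c1, if_neg c2]) hkne
    unfold pvRunA
    simp only [List.foldl_cons, hstep]
    rw [runA_acc]
    unfold pvGoB
    rw [if_neg h0, if_pos hk]
    simpa using ih
  | case4 l rest h0 hk run ih =>
    -- text line: a maximal run of text lines becomes one paragraph
    have hrun : run = rest.takeWhile pvIsText := rfl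
    have hktext : pvKindB l = "text" := by simpa [bne_iff_ne] using hk
    unfold pvRunA
    simp only [List.foldl_cons]
    rw [stepA'_text _ _ h0 hktext]
    have hsplit : rest = run ++ rest.drop run.length := by
      rw [hrun, drop_length_takeWhile]
      exact (List.takeWhile_append_dropWhile).symm
    conv_lhs => rw [hsplit]
    rw [foldl_stepA'_run run _ _ (fun x hx => List.mem_takeWhile_imp (hrun ▸ hx))]
    have hflush := runA_flush (rest.drop run.length) ([] ++ [l] ++ run)
      (by simp) (by
        intro x hx
        rw [hrun, drop_length_takeWhile] at hx
        exact head?_dropWhile_false pvIsText rest x hx)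
    unfold pvRunA at hflush
    simp only [List.nil_append] at hflush ⊢
    unfold pvRunA at ih
    rw [hflush, ih]
    conv_rhs => rw [pvGoB]
    rw [if_neg h0, if_neg (by simpa [bne_iff_ne] using hk)]
    rfl

-- ===== VERDICT (by name: the statement is the Claim_ definition above) =====
theorem parse_chapter_structure_spec : Claim_equal_parse_chapter_structure := by
  intro text _
  unfold Spec_parse_chapter_structure parse_chapter_structure parse_chapter_structure_alt
  rw [← runA_eq_goB]
  unfold pvRunA
  rw [List.foldl_map]
  rfl
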